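-- pv_equiv track=rewrite | github.com/pypi-data/pypi-mirror-396 | packages/ontocast/ontocast-0.2.4-py3-none-any.whl/ontocast/tool/structured_sparql.py | _extract_namespaces
-- ===== SOURCE A (Python) =====
-- def _extract_namespaces(query_text: str) -> dict[str, str]:
--     """Extract namespace declarations from query text.
--
--     Args:
--         query_text: The query text
--
--     Returns:
--         dict[str, str]: Dictionary mapping prefixes to URIs
--     """
--     namespaces = {}
--
--     lines = query_text.split("\n")
--     for line in lines:
--         line = line.strip()
--
--         if line.upper().startswith("PREFIX "):
--             # Parse PREFIX declaration
--             parts = line.split()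
--             if len(parts) >= 3:
--                 prefix = parts[1].rstrip(":")
--                 uri = parts[2].strip("<>")
--                 namespaces[prefix] = uri
--
--     return namespaces
-- ===== SOURCE B (Python) =====
-- def _extract_namespaces(query_text: str) -> dict[str, str]:
--     """Extract namespace declarations from query text (single-cursor line parser)."""
--     namespaces = {}
--     for line in query_text.split("\n"):
--         n = len(line)
--         i = 0
--         while i < n and line[i].isspace():
--             i += 1
--         if line[i:i + 7].upper() != "PREFIX ":
--             continue
--         i += 7
--         while i < n and line[i].isspace():
--             i += 1
--         j = i
--         while j < n and not line[j].isspace():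
--             j += 1
--         token1 = line[i:j]
--         i = j
--         while i < n and line[i].isspace():
--             i += 1
--         j = i
--         while j < n and not line[j].isspace():
--             j += 1
--         token2 = line[i:j]
--         if not token2:
--             continue
--         namespaces[token1.rstrip(":")] = token2.strip("<>")
--     return namespaces
-- ===== Notes on version B (the rewrite author's own statement) =====
-- stated objective: alternative
-- what changed: A strips each line, uppercases it, tests for the leading PREFIX keyword, and builds a full token list with split() before indexing it; B parses each line with a single left-to-right cursor (skip whitespace, compare a 7-character slice case-insensitively, then scan exactly the next two whitespace-delimited tokens), never materialising a stripped copy, an uppercased copy or a token list.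
import Mathlib
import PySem

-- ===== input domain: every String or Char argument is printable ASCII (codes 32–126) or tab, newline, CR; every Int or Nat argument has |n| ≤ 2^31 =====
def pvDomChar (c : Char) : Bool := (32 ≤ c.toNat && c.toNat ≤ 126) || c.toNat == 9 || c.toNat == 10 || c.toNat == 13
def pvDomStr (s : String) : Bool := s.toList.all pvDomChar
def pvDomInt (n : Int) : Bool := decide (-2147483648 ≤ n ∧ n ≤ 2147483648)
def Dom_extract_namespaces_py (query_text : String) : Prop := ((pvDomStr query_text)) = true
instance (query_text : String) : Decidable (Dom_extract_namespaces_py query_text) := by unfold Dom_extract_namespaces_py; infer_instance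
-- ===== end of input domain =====

-- B replaces A's strip/upper/startswith/split() pipeline per line with a single left-to-right
-- cursor parse of each line (objective: alternative; equal return values, no side effects).

-- shared helper: exact hand port of Python's s.rstrip(":") (drop trailing ':' characters)
def pvRstripColon (cs : List Char) : List Char := cs.rdropWhile (· == ':')

-- ===== PORT A =====
-- loop body of A: line = line.strip(); if line.upper().startswith("PREFIX "): parts = line.split();
-- if len(parts) >= 3: namespaces[parts[1].rstrip(":")] = parts[2].strip("<>")
def pvAStep (d : PySem.Dict String String) (line : List Char) : PySem.Dict String String :=
  let line := PySem.Chars.strip line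
  if PySem.Chars.startswith (PySem.Chars.upper line) "PREFIX ".toList then
    let parts := PySem.Chars.split₀ line
    if 3 ≤ parts.length then
      d.insert (String.ofList (pvRstripColon (parts.getD 1 [])))
               (String.ofList (PySem.Chars.stripChars (parts.getD 2 []) "<>".toList))
    else d
  else d

def extract_namespaces_py (query_text : String) : List (String × String) :=
  ((PySem.Chars.splitOn query_text.toList ['\n']).foldl pvAStep PySem.Dict.empty).items

-- ===== PORT B =====
-- while i < n and line[i].isspace(): i += 1
def pvSkipWs (cs : List Char) (i : Nat) : Nat :=
  if h : i < cs.length then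
    if PySem.Chars.isspace cs[i] then pvSkipWs cs (i+1) else i
  else i
termination_by cs.length - i

-- while j < n and not line[j].isspace(): j += 1
def pvScanTok (cs : List Char) (i : Nat) : Nat :=
  if h : i < cs.length then
    if PySem.Chars.isspace cs[i] then i else pvScanTok cs (i+1)
  else i
termination_by cs.length - i

-- loop body of B: cursor parse of one line
def pvLineStep (d : PySem.Dict String String) (cs : List Char) : PySem.Dict String String :=
  let i0 := pvSkipWs cs 0
  if PySem.Chars.upper (PySem.List.slice cs (some (i0 : Int)) (some ((i0 : Int) + 7))) = "PREFIX ".toList then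
    let i1 := pvSkipWs cs (i0 + 7)
    let j1 := pvScanTok cs i1
    let tok1 := PySem.List.slice cs (some (i1 : Int)) (some (j1 : Int))
    let i2 := pvSkipWs cs j1
    let j2 := pvScanTok cs i2
    let tok2 := PySem.List.slice cs (some (i2 : Int)) (some (j2 : Int))
    if tok2 = [] then d
    else d.insert (String.ofList (pvRstripColon tok1))
                  (String.ofList (PySem.Chars.stripChars tok2 "<>".toList))
  else d

def extract_namespaces_py_alt (query_text : String) : List (String × String) :=
  ((PySem.Chars.splitOn query_text.toList ['\n']).foldl pvLineStep PySem.Dict.empty).items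

-- ===== PRECONDITION & SPEC =====
def Spec_extract_namespaces_py (query_text : String) (out : List (String × String)) : Prop := out = extract_namespaces_py_alt query_text
instance (query_text : String) (out : List (String × String)) : Decidable (Spec_extract_namespaces_py query_text out) := by unfold Spec_extract_namespaces_py; infer_instance

-- ===== CLAIM (what is proved, stated in full; the proofs are below) =====
def Claim_equal_extract_namespaces_py : Prop := ∀ (query_text : String), Dom_extract_namespaces_py query_text → Spec_extract_namespaces_py query_text (extract_namespaces_py query_text)

-- ===== LEMMAS AND PROOFS =====

theorem pv_islower_toNat (c : Char) (h : PySem.Chars.islower c = true) :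
    97 ≤ c.toNat ∧ c.toNat ≤ 122 := by
  simp only [PySem.Chars.islower, Bool.and_eq_true, decide_eq_true_eq, Char.le_def] at h
  exact h

theorem pv_isspace_upperChar (c : Char) :
    PySem.Chars.isspace (PySem.Chars.upperChar c) = PySem.Chars.isspace c := by
  unfold PySem.Chars.upperChar
  by_cases h : PySem.Chars.islower c = true
  · obtain ⟨h1, h2⟩ := pv_islower_toNat c h
    rw [if_pos h]
    have hv : ((c.toNat - 32)).isValidChar := by constructor; omega
    have ht : (Char.ofNat (c.toNat - 32)).toNat = c.toNat - 32 := by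
      rw [Char.toNat_ofNat, if_pos hv]
    unfold PySem.Chars.isspace
    rw [ht, Bool.eq_iff_iff]
    simp only [Bool.or_eq_true, Bool.and_eq_true, decide_eq_true_eq]
    omega
  · rw [if_neg h]

theorem pv_skipWs_eq (cs : List Char) (i : Nat) :
    pvSkipWs cs i = i + ((cs.drop i).takeWhile PySem.Chars.isspace).length := by
  induction i using pvSkipWs.induct (cs := cs) with
  | case1 i h hs ih =>
    rw [pvSkipWs, dif_pos h, if_pos hs, ih]
    rw [List.drop_eq_getElem_cons h, List.takeWhile_cons, hs]
    simp; omega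
  | case2 i h hs =>
    rw [pvSkipWs, dif_pos h, if_neg hs]
    rw [List.drop_eq_getElem_cons h, List.takeWhile_cons]
    simp only [Bool.not_eq_true] at hs
    rw [hs]; simp
  | case3 i h =>
    rw [pvSkipWs, dif_neg h]
    rw [List.drop_eq_nil_of_le (by omega)]
    simp

theorem pv_scanTok_eq (cs : List Char) (i : Nat) :
    pvScanTok cs i = i + ((cs.drop i).takeWhile (fun c => !PySem.Chars.isspace c)).length := by
  induction i using pvScanTok.induct (cs := cs) with
  | case1 i h hs =>
    rw [pvScanTok, dif_pos h, if_pos hs]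
    rw [List.drop_eq_getElem_cons h, List.takeWhile_cons]
    simp [hs]
  | case2 i h hs ih =>
    rw [pvScanTok, dif_pos h, if_neg hs, ih]
    rw [List.drop_eq_getElem_cons h, List.takeWhile_cons]
    simp only [Bool.not_eq_true] at hs
    rw [hs]
    simp; omega
  | case3 i h =>
    rw [pvScanTok, dif_neg h]
    rw [List.drop_eq_nil_of_le (by omega)]
    simp

theorem pv_drop_takeWhile {α : Type} (p : α → Bool) (l : List α) :
    l.drop (l.takeWhile p).length = l.dropWhile p := by
  nth_rewrite 2 [← List.takeWhile_append_dropWhile (p := p) (l := l)]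
  exact List.drop_left

theorem pv_take_takeWhile {α : Type} (p : α → Bool) (l : List α) :
    l.take (l.takeWhile p).length = l.takeWhile p := by
  nth_rewrite 2 [← List.takeWhile_append_dropWhile (p := p) (l := l)]
  exact List.take_left

theorem pv_split₀_go_acc (s : List Char) : ∀ (cur : List Char) (acc : List (List Char)),
    PySem.Chars.split₀.go s cur acc = acc.reverse ++ PySem.Chars.split₀.go s cur [] := by
  induction s with
  | nil =>
    intro cur acc
    simp only [PySem.Chars.split₀.go]
    by_cases h : cur.isEmpty <;> simp [h]
  | cons c rest ih =>
    intro cur acc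
    simp only [PySem.Chars.split₀.go]
    by_cases hw : PySem.Chars.isspace c
    · by_cases hc : cur.isEmpty
      · simp only [hw, hc, if_true]
        exact ih [] acc
      · simp only [hw, hc, if_true, if_false, Bool.false_eq_true]
        rw [ih [] (cur.reverse :: acc), ih [] [cur.reverse]]
        simp
    · simp only [hw, Bool.false_eq_true, if_false]
      exact ih (c :: cur) acc

theorem pv_split₀_nil : PySem.Chars.split₀ [] = [] := rfl

theorem pv_split₀_cons_ws (c : Char) (l : List Char) (h : PySem.Chars.isspace c = true) :
    PySem.Chars.split₀ (c :: l) = PySem.Chars.split₀ l := by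
  unfold PySem.Chars.split₀
  simp only [PySem.Chars.split₀.go, h]
  rfl

theorem pv_split₀_go_tok (s : List Char) : ∀ (cur : List Char), cur ≠ [] →
    PySem.Chars.split₀.go s cur [] =
      (cur.reverse ++ s.takeWhile (fun c => !PySem.Chars.isspace c)) ::
        PySem.Chars.split₀ (s.dropWhile (fun c => !PySem.Chars.isspace c)) := by
  induction s with
  | nil =>
    intro cur hc
    simp only [PySem.Chars.split₀.go]
    rw [if_neg (by simpa using hc)]
    simp [PySem.Chars.split₀]
    rfl
  | cons c rest ih =>
    intro cur hc
    simp only [PySem.Chars.split₀.go, List.takeWhile_cons, List.dropWhile_cons]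
    by_cases hw : PySem.Chars.isspace c
    · rw [if_pos hw, if_neg (by simpa using hc)]
      rw [pv_split₀_go_acc rest [] [cur.reverse]]
      simp [hw]
      rw [pv_split₀_cons_ws c rest hw]
      rfl
    · rw [if_neg hw, ih (c :: cur) (by simp)]
      simp [hw]

theorem pv_split₀_cons_tok (c : Char) (l : List Char) (h : PySem.Chars.isspace c = false) :
    PySem.Chars.split₀ (c :: l) =
      (c :: l.takeWhile (fun c => !PySem.Chars.isspace c)) ::
        PySem.Chars.split₀ (l.dropWhile (fun c => !PySem.Chars.isspace c)) := by
  unfold PySem.Chars.split₀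
  simp only [PySem.Chars.split₀.go, h, Bool.false_eq_true, if_false]
  rw [pv_split₀_go_tok l [c] (by simp)]
  rfl

theorem pv_split₀_dropWhile (l : List Char) :
    PySem.Chars.split₀ (l.dropWhile PySem.Chars.isspace) = PySem.Chars.split₀ l := by
  induction l with
  | nil => rfl
  | cons c rest ih =>
    by_cases hw : PySem.Chars.isspace c
    · rw [List.dropWhile_cons_of_pos hw, ih, pv_split₀_cons_ws c rest hw]
    · rw [List.dropWhile_cons_of_neg hw]

theorem pv_split₀_all_ws (l : List Char) (h : ∀ c ∈ l, PySem.Chars.isspace c = true) :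
    PySem.Chars.split₀ l = [] := by
  induction l with
  | nil => rfl
  | cons c rest ih =>
    rw [pv_split₀_cons_ws c rest (h c (by simp))]
    exact ih (fun x hx => h x (by simp [hx]))

theorem pv_split₀_append_ws (l t : List Char) (h : ∀ c ∈ t, PySem.Chars.isspace c = true) :
    PySem.Chars.split₀ (l ++ t) = PySem.Chars.split₀ l := by
  generalize hn : l.length = n
  induction n using Nat.strong_induction_on generalizing l with
  | _ n ih =>
    match l, hn with
    | [], _ => simpa using pv_split₀_all_ws t h
    | c :: rest, hn =>
      rw [List.length_cons] at hn
      by_cases hw : PySem.Chars.isspace c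
      · rw [List.cons_append, pv_split₀_cons_ws c _ hw, pv_split₀_cons_ws c rest hw]
        exact ih rest.length (by omega) rest rfl
      · have hw' : PySem.Chars.isspace c = false := by simpa using hw
        rw [List.cons_append, pv_split₀_cons_tok c _ hw', pv_split₀_cons_tok c rest hw']
        rw [List.takeWhile_append, List.dropWhile_append]
        by_cases hall : ∀ x ∈ rest, (!PySem.Chars.isspace x) = true
        · have h1 : rest.takeWhile (fun c => !PySem.Chars.isspace c) = rest :=
            List.takeWhile_eq_self_iff.mpr hall
          have h2 : rest.dropWhile (fun c => !PySem.Chars.isspace c) = [] :=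
            List.dropWhile_eq_nil_iff.mpr hall
          rw [h1, h2]
          simp only [List.isEmpty_nil, if_true]
          have htt : t.takeWhile (fun c => !PySem.Chars.isspace c) = [] := by
            cases t with
            | nil => rfl
            | cons a b => rw [List.takeWhile_cons_of_neg (by simp [h a (by simp)])]
          have htd : t.dropWhile (fun c => !PySem.Chars.isspace c) = t := by
            cases t with
            | nil => rfl
            | cons a b => rw [List.dropWhile_cons_of_neg (by simp [h a (by simp)])]
          rw [htt, htd, pv_split₀_all_ws t h]
          rw [show PySem.Chars.split₀ [] = [] from rfl]
          simp
        · have hcond : ¬ ((rest.takeWhile (fun c => !PySem.Chars.isspace c)).length = rest.length) := by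
            intro hlen
            exact hall (List.takeWhile_eq_self_iff.mp
              ((List.takeWhile_sublist _).eq_of_length hlen))
          have hne : rest.dropWhile (fun c => !PySem.Chars.isspace c) ≠ [] := by
            intro hnil
            exact hall (List.dropWhile_eq_nil_iff.mp hnil)
          rw [if_neg hcond, if_neg (by simpa [List.isEmpty_iff] using hne)]
          have hlen2 : (rest.dropWhile (fun c => !PySem.Chars.isspace c)).length < n := by
            have := (List.dropWhile_sublist (l := rest) (fun c => !PySem.Chars.isspace c)).length_le
            omega
          rw [ih _ hlen2 _ rfl]

theorem pv_takeWhile_eq_take {α : Type} (p : α → Bool) :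
    ∀ (l : List α) (n : Nat) (hn : n < l.length),
      (∀ k (hk : k < n), p (l[k]'(by omega)) = true) → p (l[n]'hn) = false →
      l.takeWhile p = l.take n ∧ l.dropWhile p = l.drop n := by
  intro l
  induction l with
  | nil => intro n hn; simp at hn
  | cons a rest ih =>
    intro n hn h1 h2
    cases n with
    | zero =>
      simp only [List.getElem_cons_zero] at h2
      simp [h2]
    | succ m =>
      have ha : p a = true := h1 0 (by omega)
      have hm : m < rest.length := by simp at hn; omega
      have ih' := ih m hm (fun k hk => h1 (k+1) (by omega)) (by simpa using h2)
      rw [List.takeWhile_cons_of_pos ha, List.dropWhile_cons_of_pos ha,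
        List.take_succ_cons, List.drop_succ_cons, ih'.1, ih'.2]
      exact ⟨rfl, rfl⟩

theorem pv_dropWhile_head {α : Type} (p : α → Bool) (l : List α) (a : α) (t : List α)
    (h : l.dropWhile p = a :: t) : p a = false := by
  induction l with
  | nil => simp at h
  | cons b rest ih =>
    rw [List.dropWhile_cons] at h
    by_cases hb : p b
    · rw [if_pos hb] at h; exact ih h
    · rw [if_neg hb] at h
      cases h
      simpa using hb

theorem pv_drop_skipWs (cs : List Char) (i : Nat) :
    cs.drop (pvSkipWs cs i) = (cs.drop i).dropWhile PySem.Chars.isspace := by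
  rw [pv_skipWs_eq, ← List.drop_drop, pv_drop_takeWhile]

theorem pv_skipWs_zero (cs : List Char) :
    cs.drop (pvSkipWs cs 0) = cs.dropWhile PySem.Chars.isspace := by
  rw [pv_drop_skipWs, List.drop_zero]

theorem pv_slice_scanTok (cs : List Char) (i : Nat) :
    PySem.List.slice cs (some (i : Int)) (some ((pvScanTok cs i) : Int)) =
      (cs.drop i).takeWhile (fun c => !PySem.Chars.isspace c) := by
  rw [PySem.List.slice_natCast, pv_scanTok_eq, Nat.add_sub_cancel_left, pv_take_takeWhile]

theorem pv_drop_scanTok (cs : List Char) (i : Nat) :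
    cs.drop (pvScanTok cs i) = (cs.drop i).dropWhile (fun c => !PySem.Chars.isspace c) := by
  rw [pv_scanTok_eq, ← List.drop_drop, pv_drop_takeWhile]

theorem pv_split₀_head (l : List Char) (c : Char) (r : List Char) (hl : l = c :: r)
    (hh : PySem.Chars.isspace c = false) :
    PySem.Chars.split₀ l =
      l.takeWhile (fun c => !PySem.Chars.isspace c) ::
        PySem.Chars.split₀ (l.dropWhile (fun c => !PySem.Chars.isspace c)) := by
  subst hl
  rw [pv_split₀_cons_tok c r hh, List.takeWhile_cons_of_pos (by simp [hh]),
    List.dropWhile_cons_of_pos (by simp [hh])]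

theorem pv_step_eq (d : PySem.Dict String String) (cs : List Char) :
    pvAStep d cs = pvLineStep d cs := by
  have hP7 : "PREFIX ".toList = ['P','R','E','F','I','X',' '] := rfl
  set u : List Char := cs.dropWhile PySem.Chars.isspace with hu_def
  set t : List Char := (u.reverse.takeWhile PySem.Chars.isspace).reverse with ht_def
  set s : List Char := (u.reverse.dropWhile PySem.Chars.isspace).reverse with hs_def
  have hu_decomp : u = s ++ t := by
    rw [hs_def, ht_def, ← List.reverse_append, List.takeWhile_append_dropWhile, List.reverse_reverse]
  have ht_ws : ∀ c ∈ t, PySem.Chars.isspace c = true := by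
    intro c hc
    rw [ht_def] at hc
    exact List.mem_takeWhile_imp (List.mem_reverse.mp hc)
  have hstrip : PySem.Chars.strip cs = s := rfl
  have hi0 : cs.drop (pvSkipWs cs 0) = u := pv_skipWs_zero cs
  have hslice7 : PySem.List.slice cs (some ((pvSkipWs cs 0 : Nat) : Int))
      (some (((pvSkipWs cs 0 : Nat) : Int) + 7)) = u.take 7 := by
    have h77 : ((pvSkipWs cs 0 : Nat) : Int) + 7 = ((pvSkipWs cs 0 + 7 : Nat) : Int) := by push_cast; ring
    rw [h77, PySem.List.slice_natCast, Nat.add_sub_cancel_left, ← hi0]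
  have hdrop7 : cs.drop (pvSkipWs cs 0 + 7) = u.drop 7 := by
    rw [← List.drop_drop, hi0]
  have hi1 : cs.drop (pvSkipWs cs (pvSkipWs cs 0 + 7)) = (u.drop 7).dropWhile PySem.Chars.isspace := by
    rw [pv_drop_skipWs, hdrop7]
  have htok1 : PySem.List.slice cs (some ((pvSkipWs cs (pvSkipWs cs 0 + 7) : Nat) : Int))
      (some ((pvScanTok cs (pvSkipWs cs (pvSkipWs cs 0 + 7)) : Nat) : Int)) =
      ((u.drop 7).dropWhile PySem.Chars.isspace).takeWhile (fun c => !PySem.Chars.isspace c) := by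
    rw [pv_slice_scanTok, hi1]
  have hj1 : cs.drop (pvScanTok cs (pvSkipWs cs (pvSkipWs cs 0 + 7))) =
      ((u.drop 7).dropWhile PySem.Chars.isspace).dropWhile (fun c => !PySem.Chars.isspace c) := by
    rw [pv_drop_scanTok, hi1]
  have hi2 : cs.drop (pvSkipWs cs (pvScanTok cs (pvSkipWs cs (pvSkipWs cs 0 + 7)))) =
      (((u.drop 7).dropWhile PySem.Chars.isspace).dropWhile (fun c => !PySem.Chars.isspace c)).dropWhile
        PySem.Chars.isspace := by
    rw [pv_drop_skipWs, hj1]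
  have htok2 : PySem.List.slice cs
      (some ((pvSkipWs cs (pvScanTok cs (pvSkipWs cs (pvSkipWs cs 0 + 7))) : Nat) : Int))
      (some ((pvScanTok cs (pvSkipWs cs (pvScanTok cs (pvSkipWs cs (pvSkipWs cs 0 + 7)))) : Nat) : Int)) =
      ((((u.drop 7).dropWhile PySem.Chars.isspace).dropWhile (fun c => !PySem.Chars.isspace c)).dropWhile
        PySem.Chars.isspace).takeWhile (fun c => !PySem.Chars.isspace c) := by
    rw [pv_slice_scanTok, hi2]
  simp only [pvAStep, pvLineStep]
  rw [hstrip, hslice7, htok1, htok2]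
  by_cases hB : PySem.Chars.upper (u.take 7) = "PREFIX ".toList
  · rw [if_pos hB]
    have hm : List.map PySem.Chars.upperChar (u.take 7) = "PREFIX ".toList := hB
    have h7u : 7 ≤ u.length := by
      have := congrArg List.length hm
      simp [List.length_take] at this
      omega
    have hws_at : ∀ (k : Nat) (hk7 : k < 7),
        PySem.Chars.isspace (u[k]'(by omega)) =
          PySem.Chars.isspace ((['P','R','E','F','I','X',' '] : List Char)[k]'(by simp; omega)) := by
      intro k hk7
      rw [hP7] at hm
      have hlen : k < (List.map PySem.Chars.upperChar (u.take 7)).length := by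
        simp [List.length_take]; omega
      have h3 := List.getElem_of_eq hm (by omega : k < (List.map PySem.Chars.upperChar (u.take 7)).length)
      rw [List.getElem_map, List.getElem_take] at h3
      rw [← pv_isspace_upperChar, h3]
    have hnws : ∀ (k : Nat) (hk6 : k < 6), PySem.Chars.isspace (u[k]'(by omega)) = false := by
      intro k hk6
      have h4 := hws_at k (by omega)
      interval_cases k <;> simpa using h4
    have hws6 : PySem.Chars.isspace (u[6]'(by omega)) = true := by
      have h4 := hws_at 6 (by omega)
      simpa using h4
    have htk := pv_takeWhile_eq_take (fun c => !PySem.Chars.isspace c) u 6 (by omega)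
      (fun k hk => by simp [hnws k hk]) (by simp [hws6])
    have hu_cons : u = u[0]'(by omega) :: u.drop 1 := by
      have h5 := List.drop_eq_getElem_cons (show 0 < u.length by omega)
      simpa using h5
    have hdrop6 : u.drop 6 = u[6]'(by omega) :: u.drop 7 := List.drop_eq_getElem_cons (by omega)
    have hsplitu : PySem.Chars.split₀ u = u.take 6 :: PySem.Chars.split₀ (u.drop 7) := by
      rw [pv_split₀_head u (u[0]'(by omega)) (u.drop 1) hu_cons (hnws 0 (by omega)),
        htk.1, htk.2, hdrop6, pv_split₀_cons_ws _ _ hws6]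
    have hsu : PySem.Chars.split₀ s = PySem.Chars.split₀ u := by
      rw [hu_decomp, pv_split₀_append_ws s t ht_ws]
    by_cases hslen : 7 ≤ s.length
    · have hst7 : s.take 7 = u.take 7 := by
        rw [hu_decomp, List.take_append, Nat.sub_eq_zero_of_le hslen, List.take_zero,
          List.append_nil]
      have hcondA : PySem.Chars.startswith (PySem.Chars.upper s) "PREFIX ".toList = true := by
        rw [PySem.Chars.startswith_iff, List.prefix_iff_eq_take]
        show "PREFIX ".toList = (PySem.Chars.upper s).take ("PREFIX ".toList).length
        have : ("PREFIX ".toList).length = 7 := rfl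
        rw [this]
        show "PREFIX ".toList = (List.map PySem.Chars.upperChar s).take 7
        rw [← List.map_take, hst7, hm]
      rw [if_pos hcondA, hsu, hsplitu]
      rcases hw1 : (u.drop 7).dropWhile PySem.Chars.isspace with _ | ⟨c1, w1t⟩
      · rw [← pv_split₀_dropWhile (u.drop 7), hw1, pv_split₀_nil]
        simp
      · have hc1 : PySem.Chars.isspace c1 = false := pv_dropWhile_head _ _ _ _ hw1
        rw [← pv_split₀_dropWhile (u.drop 7), hw1]
        rw [pv_split₀_head (c1 :: w1t) c1 w1t rfl hc1]
        have ht1 : (c1 :: w1t).takeWhile (fun c => !PySem.Chars.isspace c) =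
            c1 :: w1t.takeWhile (fun c => !PySem.Chars.isspace c) :=
          List.takeWhile_cons_of_pos (by simp [hc1])
        rcases hw2 : ((c1 :: w1t).dropWhile (fun c => !PySem.Chars.isspace c)).dropWhile
            PySem.Chars.isspace with _ | ⟨c2, w2t⟩
        · rw [← pv_split₀_dropWhile ((c1 :: w1t).dropWhile (fun c => !PySem.Chars.isspace c)), hw2,
            pv_split₀_nil]
          simp
        · have hc2 : PySem.Chars.isspace c2 = false := pv_dropWhile_head _ _ _ _ hw2
          rw [← pv_split₀_dropWhile ((c1 :: w1t).dropWhile (fun c => !PySem.Chars.isspace c)), hw2,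
            pv_split₀_head (c2 :: w2t) c2 w2t rfl hc2]
          have ht2 : (c2 :: w2t).takeWhile (fun c => !PySem.Chars.isspace c) =
              c2 :: w2t.takeWhile (fun c => !PySem.Chars.isspace c) :=
            List.takeWhile_cons_of_pos (by simp [hc2])
          rw [if_pos (by simp), if_neg (by rw [ht2]; simp)]
          simp [List.getD]
    · have hcondA : ¬ (PySem.Chars.startswith (PySem.Chars.upper s) "PREFIX ".toList = true) := by
        intro hA
        have hpre := (PySem.Chars.startswith_iff _ _).mp hA
        have := hpre.length_le
        simp [PySem.Chars.upper] at this
        omega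
      rw [if_neg hcondA]
      have hrest_ws : ∀ c ∈ u.drop 7, PySem.Chars.isspace c = true := by
        intro c hc
        rw [hu_decomp, List.drop_append, List.drop_eq_nil_of_le (by omega)] at hc
        simp only [List.nil_append] at hc
        exact ht_ws c (List.drop_subset _ _ hc)
      have hw1 : (u.drop 7).dropWhile PySem.Chars.isspace = [] :=
        List.dropWhile_eq_nil_iff.mpr hrest_ws
      rw [hw1]
      simp
  · rw [if_neg hB]
    have hcondA : ¬ (PySem.Chars.startswith (PySem.Chars.upper s) "PREFIX ".toList = true) := by
      intro hA
      have hpre := (PySem.Chars.startswith_iff _ _).mp hA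
      have hlen : 7 ≤ s.length := by
        have := hpre.length_le
        simpa [PySem.Chars.upper] using this
      have hst7 : s.take 7 = u.take 7 := by
        rw [hu_decomp, List.take_append, Nat.sub_eq_zero_of_le hlen, List.take_zero,
          List.append_nil]
      apply hB
      have h6 := List.prefix_iff_eq_take.mp hpre
      show List.map PySem.Chars.upperChar (u.take 7) = "PREFIX ".toList
      rw [← hst7, List.map_take]
      exact (by simpa using h6.symm)
    rw [if_neg hcondA]

-- ===== VERDICT (by name: the statement is the Claim_ definition above) =====
theorem extract_namespaces_py_spec : Claim_equal_extract_namespaces_py := by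
  intro q _
  unfold Spec_extract_namespaces_py extract_namespaces_py extract_namespaces_py_alt
  rw [List.foldl_ext pvAStep pvLineStep _ (fun d l _ => pv_step_eq d l)]
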